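-- pv_equiv track=rewrite | github.com/sense-fw/python-study_practice | practice_8/pract8_8.py | count_and_max_divisible
-- ===== SOURCE A (Python) =====
-- def count_and_max_divisible(matrix, k):
--     count = 0
--     max_elem = None
--     for row in matrix:
--         for elem in row:
--             if elem % k == 0:
--                 count += 1
--                 if max_elem is None or elem > max_elem:
--                     max_elem = elem
--     return count, max_elem
-- ===== SOURCE B (Python) =====
-- def count_and_max_divisible(matrix, k):
--     # Sort-then-pick: collect divisible elements, sort descending; the max is
--     # then simply the first element, no running-max bookkeeping needed.
--     divs = sorted((e for row in matrix for e in row if e % k == 0), reverse=True)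
--     return len(divs), (divs[0] if divs else None)
-- ===== Notes on version B (the rewrite author's own statement) =====
-- stated objective: alternative
-- what changed: B collects the divisible elements and sorts them in descending order, reading the maximum off as the first element of the sorted list, instead of A's fused pass that maintains a counter and a running maximum together.
import Mathlib
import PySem

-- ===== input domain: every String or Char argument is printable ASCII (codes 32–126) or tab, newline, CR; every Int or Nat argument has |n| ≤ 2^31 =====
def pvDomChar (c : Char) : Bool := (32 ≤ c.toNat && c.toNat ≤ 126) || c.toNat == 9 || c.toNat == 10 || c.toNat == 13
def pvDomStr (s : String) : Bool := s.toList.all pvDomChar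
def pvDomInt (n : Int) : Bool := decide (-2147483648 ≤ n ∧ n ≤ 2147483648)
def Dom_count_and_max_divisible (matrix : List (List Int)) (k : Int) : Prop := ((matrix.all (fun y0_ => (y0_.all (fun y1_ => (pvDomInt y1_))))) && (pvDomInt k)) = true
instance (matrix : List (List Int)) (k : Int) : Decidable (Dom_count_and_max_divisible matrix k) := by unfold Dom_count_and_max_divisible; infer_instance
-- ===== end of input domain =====

-- B replaces A's fused counting/running-max pass by sorting the divisible
-- elements in descending order and picking the head as the maximum (objective:
-- alternative; B is not faster).

-- ===== PORT A =====
-- A's fused loop: state (count, max_elem), elements visited row by row.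
def pvStepA (k : Int) (st : Int × Option Int) (elem : Int) : Int × Option Int :=
  if PySem.Int.mod elem k == 0 then
    (st.1 + 1,
     match st.2 with
     | none => some elem
     | some m => if elem > m then some elem else some m)
  else st

def count_and_max_divisible (matrix : List (List Int)) (k : Int) : Int × Option Int :=
  matrix.foldl (fun st row => row.foldl (pvStepA k) st) (0, none)

-- ===== PORT B =====
-- 'divs[0] if divs else None' is exactly List.head? of the sorted list.
def count_and_max_divisible_alt (matrix : List (List Int)) (k : Int) : Int × Option Int :=
  let divs := PySem.List.sorted
      (matrix.flatMap (fun row => row.filter (fun e => PySem.Int.mod e k == 0)))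
      (fun x => x) true
  ((divs.length : Int), divs.head?)

-- ===== PRECONDITION & SPEC =====
-- Pre_ excludes exactly the inputs where Python's 'elem % k' raises ZeroDivisionError:
-- k = 0 with at least one matrix element (both A and B raise there).
def Pre_count_and_max_divisible (matrix : List (List Int)) (k : Int) : Prop :=
  k ≠ 0 ∨ ∀ row ∈ matrix, row = []
instance (matrix : List (List Int)) (k : Int) : Decidable (Pre_count_and_max_divisible matrix k) := by unfold Pre_count_and_max_divisible; infer_instance

def pvWitness_count_and_max_divisible : List (List Int) × Int := ([[6, 7], [9]], 3)

def Spec_count_and_max_divisible (matrix : List (List Int)) (k : Int) (out : Int × Option Int) : Prop := out = count_and_max_divisible_alt matrix k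
instance (matrix : List (List Int)) (k : Int) (out : Int × Option Int) : Decidable (Spec_count_and_max_divisible matrix k out) := by unfold Spec_count_and_max_divisible; infer_instance

-- ===== CLAIM (what is proved, stated in full; the proofs are below) =====
def Claim_equal_count_and_max_divisible : Prop := ∀ (matrix : List (List Int)) (k : Int), Dom_count_and_max_divisible matrix k → Pre_count_and_max_divisible matrix k → Spec_count_and_max_divisible matrix k (count_and_max_divisible matrix k)

-- ===== LEMMAS AND PROOFS =====

-- updating the running max with e is taking the max
theorem pvUpd_eq_max (m e : Int) :
    (if e > m then some e else some m) = some (max m e) := by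
  split_ifs with h <;> simp [max_def] <;> omega

-- running the option-max accumulator over a list starting from some x is foldl max
theorem pvFoldUpd_some (t : List Int) (x : Int) :
    t.foldl (fun (o : Option Int) e =>
        match o with
        | none => some e
        | some m => if e > m then some e else some m) (some x)
      = some (t.foldl max x) := by
  induction t generalizing x with
  | nil => rfl
  | cons a t ih =>
    have h : (fun (o : Option Int) e =>
        match o with
        | none => some e
        | some m => if e > m then some e else some m) (some x) a = some (max x a) :=
      pvUpd_eq_max x a
    simp only [List.foldl, h, ih]

-- A's fused step over one list = count of filtered + option-max fold over filtered
theorem pvRow_fold (k : Int) (l : List Int) (c : Int) (m : Option Int) :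
    l.foldl (pvStepA k) (c, m)
      = (c + ((l.filter (fun e => PySem.Int.mod e k == 0)).length : Int),
         (l.filter (fun e => PySem.Int.mod e k == 0)).foldl (fun (o : Option Int) e =>
            match o with
            | none => some e
            | some m => if e > m then some e else some m) m) := by
  induction l generalizing c m with
  | nil => simp
  | cons a t ih =>
    by_cases h : PySem.Int.mod a k == 0
    · simp [List.foldl, pvStepA, h, ih]
      omega
    · simp [List.foldl, pvStepA, h, ih]

-- A over the whole matrix, in terms of the flattened filtered list
theorem pvMatrix_fold (k : Int) (matrix : List (List Int)) (c : Int) (m : Option Int) :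
    matrix.foldl (fun st row => row.foldl (pvStepA k) st) (c, m)
      = (c + (((matrix.flatMap (fun row => row.filter (fun e => PySem.Int.mod e k == 0))).length : Int)),
         (matrix.flatMap (fun row => row.filter (fun e => PySem.Int.mod e k == 0))).foldl
            (fun (o : Option Int) e =>
              match o with
              | none => some e
              | some m => if e > m then some e else some m) m) := by
  induction matrix generalizing c m with
  | cons r rs ih =>
    simp only [List.foldl, List.flatMap_cons, pvRow_fold, ih, List.foldl_append,
      List.length_append]
    push_cast
    ring_nf
  | nil => simp

-- foldl max over a::t is a member of a::t
theorem pvFoldlMax_mem (t : List Int) (a : Int) : t.foldl max a ∈ a :: t := by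
  induction t generalizing a with
  | nil => simp
  | cons b t ih =>
    simp only [List.foldl]
    have h := ih (max a b)
    rcases List.mem_cons.mp h with h | h
    · rcases max_choice a b with hm | hm
      · rw [h, hm]; exact List.mem_cons_self
      · rw [h, hm]; simp
    · exact List.mem_cons_of_mem _ (List.mem_cons_of_mem _ h)

-- foldl max over a::t bounds every member
theorem pvLe_foldlMax (t : List Int) (a : Int) : ∀ y ∈ a :: t, y ≤ t.foldl max a := by
  induction t generalizing a with
  | nil => simp
  | cons b t ih =>
    intro y hy
    simp only [List.foldl]
    have h := ih (max a b)
    rcases List.mem_cons.mp hy with hy | hy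
    · subst hy; exact le_trans (le_max_left y b) (h _ List.mem_cons_self)
    · rcases List.mem_cons.mp hy with hy | hy
      · subst hy; exact le_trans (le_max_right a y) (h _ List.mem_cons_self)
      · exact h _ (List.mem_cons_of_mem _ hy)

-- the head of the descending sort of a::t is foldl max a t
theorem pvHead_sorted_rev (a : Int) (t : List Int) :
    (PySem.List.sorted (a :: t) (fun x => x) true).head? = some (t.foldl max a) := by
  cases hs : PySem.List.sorted (a :: t) (fun x => x) true with
  | nil =>
    have := PySem.List.sorted_perm (a :: t) (fun x => x) true
    rw [hs] at this
    exact absurd this.symm (by simp)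
  | cons h s =>
    have hmem : h ∈ a :: t := by
      have := (PySem.List.mem_sorted (xs := a :: t) (key := fun x => x) (rev := true) (x := h)).mp
      rw [hs] at this
      exact this (by simp)
    have h1 : h ≤ t.foldl max a := pvLe_foldlMax t a h hmem
    have h2 : t.foldl max a ≤ h :=
      PySem.List.key_head_sorted_rev_ge _ _ hs _ (pvFoldlMax_mem t a)
    simp [le_antisymm h1 h2]

-- ===== VERDICT (by name: the statement is the Claim_ definition above) =====
theorem count_and_max_divisible_spec : Claim_equal_count_and_max_divisible := by
  intro matrix k _ _
  unfold Spec_count_and_max_divisible count_and_max_divisible count_and_max_divisible_alt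
  rw [pvMatrix_fold]
  cases h : matrix.flatMap (fun row => row.filter (fun e => PySem.Int.mod e k == 0)) with
  | nil => simp [PySem.List.sorted]
  | cons a t =>
    simp [pvFoldUpd_some, pvHead_sorted_rev, PySem.List.length_sorted]
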